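-- pv_equiv track=rewrite | github.com/xProTorkz/catalogador | backend/catalogador/intelligence.py | reconstruct_grid
-- ===== SOURCE A (Python) =====
-- def reconstruct_grid(history_asc):
--     """
--     REGRA DA GRADE (MANDATÓRIO):
--     - 6 linhas por coluna
--     - Preenchimento vertical
--     - Ao atingir 6 linhas -> iniciar nova coluna
--     """
--     grid = []
--     current_column = []
--
--     for round_data in history_asc:
--         result = round_data.get('resultado')
--         current_column.append(result)
--
--         if len(current_column) == 6:
--             grid.append(current_column)
--             current_column = []
--
--     # Append incomplete last column
--     if current_column:
--         grid.append(current_column)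
--
--     return grid
-- ===== SOURCE B (Python) =====
-- def reconstruct_grid(history_asc):
--     results = [round_data.get('resultado') for round_data in history_asc]
--     return [results[i:i + 6] for i in range(0, len(results), 6)]
-- ===== Notes on version B (the rewrite author's own statement) =====
-- stated objective: idiomatic
-- what changed: Replaces the stateful loop with a growing column and counter-reset by a two-phase map-then-chunk: first extract all results, then slice the flat list at offsets 0,6,12,... into columns.
import Mathlib
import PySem

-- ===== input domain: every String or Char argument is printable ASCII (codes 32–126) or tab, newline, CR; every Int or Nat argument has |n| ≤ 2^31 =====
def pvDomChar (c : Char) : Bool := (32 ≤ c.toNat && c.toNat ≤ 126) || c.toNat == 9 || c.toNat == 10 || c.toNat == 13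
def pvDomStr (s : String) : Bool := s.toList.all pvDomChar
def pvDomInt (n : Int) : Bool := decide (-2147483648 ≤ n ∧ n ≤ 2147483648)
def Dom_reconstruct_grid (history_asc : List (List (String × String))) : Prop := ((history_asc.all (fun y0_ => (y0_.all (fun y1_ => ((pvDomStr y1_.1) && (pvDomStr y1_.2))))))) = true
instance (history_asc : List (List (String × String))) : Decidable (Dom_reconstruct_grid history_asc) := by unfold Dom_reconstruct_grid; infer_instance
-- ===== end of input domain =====

-- B replaces A's stateful column-accumulation loop by a two-phase map-then-slice chunking (idiomatic decomposition, same cost).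


-- ===== PORT A =====
-- A's loop body: append the result to the current column; on reaching 6, push the column to the grid.
def stepA (st : List (List (Option String)) × List (Option String)) (result : Option String) :
    List (List (Option String)) × List (Option String) :=
  let current_column := st.2 ++ [result]
  if current_column.length = 6 then (st.1 ++ [current_column], []) else (st.1, current_column)

-- A: one pass with a growing current column (state = (grid, current_column)); append the incomplete tail column.
def reconstruct_grid (history_asc : List (List (String × String))) : List (List (Option String)) :=
  let st := history_asc.foldl
    (fun st round_data => stepA st ((PySem.Dict.mk round_data).get? "resultado"))
    (([], []) : List (List (Option String)) × List (Option String))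
  if st.2 ≠ [] then st.1 ++ [st.2] else st.1

-- ===== PORT B =====
-- B: extract the flat list of results, then chunk it by slicing at offsets 0, 6, 12, …
def reconstruct_grid_alt (history_asc : List (List (String × String))) : List (List (Option String)) :=
  let results := history_asc.map (fun round_data => (PySem.Dict.mk round_data).get? "resultado")
  (PySem.List.pyRange 0 (results.length : Int) 6).map
    (fun i => PySem.List.slice results (some i) (some (i + 6)))

-- ===== PRECONDITION & SPEC =====
def Spec_reconstruct_grid (history_asc : List (List (String × String))) (out : List (List (Option String))) : Prop := out = reconstruct_grid_alt history_asc
instance (history_asc : List (List (String × String))) (out : List (List (Option String))) : Decidable (Spec_reconstruct_grid history_asc out) := by unfold Spec_reconstruct_grid; infer_instance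

-- ===== CLAIM (what is proved, stated in full; the proofs are below) =====
def Claim_equal_reconstruct_grid : Prop := ∀ (history_asc : List (List (String × String))), Dom_reconstruct_grid history_asc → Spec_reconstruct_grid history_asc (reconstruct_grid history_asc)

-- ===== LEMMAS AND PROOFS =====

-- Common reference shape: chop a list into chunks of 6.
def chunks6 {α : Type} (l : List α) : List (List α) :=
  if l = [] then [] else l.take 6 :: chunks6 (l.drop 6)
termination_by l.length
decreasing_by
  cases l with
  | nil => simp_all
  | cons x t => simp

lemma foldA_eq_chunks6 (rs : List (Option String)) :
    ∀ (g : List (List (Option String))) (c : List (Option String)), c.length < 6 →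
      (let st := rs.foldl stepA (g, c); if st.2 ≠ [] then st.1 ++ [st.2] else st.1) =
        g ++ chunks6 (c ++ rs) := by
  induction rs with
  | nil =>
    intro g c hc
    by_cases h : c = []
    · simp [h, chunks6]
    · have h1 : c.take 6 = c := List.take_of_length_le (by omega)
      have h2 : c.drop 6 = [] := List.drop_eq_nil_of_le (by omega)
      simp only [List.foldl_nil, List.append_nil]
      rw [chunks6, if_neg h, h1, h2, chunks6]
      simp [h]
  | cons r t ih =>
    intro g c hc
    simp only [List.foldl_cons]
    by_cases h6 : (c ++ [r]).length = 6
    · have hs : stepA (g, c) r = (g ++ [c ++ [r]], []) := by simp only [stepA]; rw [if_pos h6]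
      rw [hs, ih _ [] (by simp)]
      have hchunks : chunks6 (c ++ r :: t) = (c ++ [r]) :: chunks6 t := by
        rw [chunks6]
        have he : c ++ r :: t = (c ++ [r]) ++ t := by simp
        simp only [he]
        rw [if_neg (by simp), List.take_left' h6, List.drop_left' h6]
      simp [hchunks]
    · have hs : stepA (g, c) r = (g, c ++ [r]) := by simp only [stepA]; rw [if_neg h6]
      have hlen : (c ++ [r]).length < 6 := by simp at h6 ⊢; omega
      rw [hs, ih _ (c ++ [r]) hlen]
      simp

lemma pyRangeSix_cons (a b : Int) (h : a < b) :
    PySem.List.pyRange a b 6 = a :: PySem.List.pyRange (a + 6) b 6 := by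
  rw [PySem.List.pyRange_of_pos _ _ (by norm_num), PySem.List.pyRange_of_pos _ _ (by norm_num)]
  by_cases h6 : a + 6 < b
  · have hn : ((b - a + 6 - 1) / 6).toNat = ((b - (a + 6) + 6 - 1) / 6).toNat + 1 := by omega
    rw [if_pos h, if_pos h6, hn, List.range_succ_eq_map]
    simp only [List.map_cons, List.map_map]
    refine List.cons_eq_cons.mpr ⟨by simp, ?_⟩
    refine List.map_congr_left (fun k _ => ?_)
    simp only [Function.comp]
    push_cast
    ring
  · have hn : ((b - a + 6 - 1) / 6).toNat = 1 := by omega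
    rw [if_pos h, if_neg h6, hn]
    simp

lemma mapSlice_eq_chunks6 {α : Type} (rs : List α) (a : Nat) :
    (PySem.List.pyRange (a : Int) (rs.length : Int) 6).map
        (fun i => PySem.List.slice rs (some i) (some (i + 6))) = chunks6 (rs.drop a) := by
  by_cases h : rs.length ≤ a
  · rw [PySem.List.pyRange_of_pos _ _ (by norm_num)]
    rw [if_neg (by exact_mod_cast not_lt.mpr h)]
    rw [chunks6]
    simp [List.drop_eq_nil_of_le h]
  · have hlt : (a : Int) < (rs.length : Int) := by exact_mod_cast (by omega : a < rs.length)
    rw [pyRangeSix_cons _ _ hlt, List.map_cons]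
    have hcast : ((a : Int) + 6) = (((a + 6 : Nat)) : Int) := by push_cast; ring
    rw [hcast, mapSlice_eq_chunks6 rs (a + 6)]
    have hslice : PySem.List.slice rs (some ((a : Nat) : Int)) (some (((a + 6 : Nat)) : Int)) =
        (rs.drop a).take 6 := by
      have h66 : (((a + 6 : Nat)) : Int) = ((a : Nat) : Int) + ((6 : Nat) : Int) := by push_cast; ring
      rw [h66, PySem.List.slice_natCast_add]
    rw [hslice]
    conv_rhs => rw [chunks6]
    rw [if_neg (by simp; omega)]
    congr 1
    simp [List.drop_drop]
termination_by rs.length - a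
decreasing_by omega

-- ===== VERDICT (by name: the statement is the Claim_ definition above) =====
theorem reconstruct_grid_spec : Claim_equal_reconstruct_grid := by
  intro history_asc _
  unfold Spec_reconstruct_grid
  have hb : reconstruct_grid_alt history_asc =
      chunks6 (history_asc.map (fun round_data => (PySem.Dict.mk round_data).get? "resultado")) := by
    simp only [reconstruct_grid_alt]
    have := mapSlice_eq_chunks6
      (history_asc.map (fun round_data => (PySem.Dict.mk round_data).get? "resultado")) 0
    simpa using this
  have ha : reconstruct_grid history_asc =
      chunks6 (history_asc.map (fun round_data => (PySem.Dict.mk round_data).get? "resultado")) := by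
    simp only [reconstruct_grid]
    rw [← List.foldl_map]
    have := foldA_eq_chunks6
      (history_asc.map (fun round_data => (PySem.Dict.mk round_data).get? "resultado")) [] []
      (by simp)
    simpa using this
  rw [ha, hb]
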